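-- pv_equiv track=rewrite | github.com/hyein99/Algorithm_baekjoon | 분류별/문자열/16120_PPAP.py | isPPAP
-- ===== SOURCE A (Python) =====
-- def isPPAP(s):
--     done = []
--     for i in range(len(s)):
--         done.append(s[i])
--         if len(done) >= 4 and done[-4:] == PPAP:
--             for _ in range(3):
--                 done.pop()
--     if done == ['P'] or done == PPAP:
--         return 'PPAP'
--     else:
--         return 'NP'
--
-- PPAP = ['P', 'P', 'A', 'P']
-- ===== SOURCE B (Python) =====
-- def isPPAP(s):
--     while 'PPAP' in s:
--         s = s.replace('PPAP', 'P')
--     return 'PPAP' if s == 'P' else 'NP'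
-- ===== Notes on version B (the rewrite author's own statement) =====
-- stated objective: simpler
-- what changed: Replaced A's one-pass stack simulation (append each char, pop 3 whenever the stack top reads 'PPAP') by a fixpoint rewrite loop that globally collapses every 'PPAP' occurrence to 'P' until none remains and then tests whether the normal form is 'P'.
import Mathlib
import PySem

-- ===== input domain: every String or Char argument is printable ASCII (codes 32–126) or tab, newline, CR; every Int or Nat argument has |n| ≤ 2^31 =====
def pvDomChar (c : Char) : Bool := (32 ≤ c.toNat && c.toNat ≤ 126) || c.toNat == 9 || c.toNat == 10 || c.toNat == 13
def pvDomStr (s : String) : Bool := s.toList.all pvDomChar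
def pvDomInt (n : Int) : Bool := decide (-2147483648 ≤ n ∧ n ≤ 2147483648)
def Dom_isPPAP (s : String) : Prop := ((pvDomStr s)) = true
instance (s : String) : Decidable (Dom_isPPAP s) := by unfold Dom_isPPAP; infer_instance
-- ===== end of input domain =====

-- B replaces A's one-pass stack simulation by a fixpoint rewrite loop (collapse every 'PPAP'
-- to 'P' until none remains, then test for 'P'): simpler, same exact output.

-- ===== PORT A =====
def ppapConst : List Char := ['P', 'P', 'A', 'P']

-- loop body of A: done.append(s[i]); if len(done) >= 4 and done[-4:] == PPAP: pop() 3 times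
-- (list.pop() with the value discarded is dropLast)
def isPPAPstep (done : List Char) (c : Char) : List Char :=
  let done := done ++ [c]
  if 4 ≤ done.length ∧ PySem.List.slice done (some (-4)) none = ppapConst then
    (PySem.List.pyRange 0 3 1).foldl (fun d _ => d.dropLast) done
  else done

def isPPAP (s : String) : String :=
  let done := s.toList.foldl isPPAPstep []
  if done = ['P'] ∨ done = ppapConst then "PPAP" else "NP"

-- ===== PORT B =====
-- equation lemmas for PySem.Chars.replace.go, and the termination lemma the loop cites:
-- one replace of 'PPAP' by 'P' strictly shortens the string
theorem replaceGo_zero (old new l acc : List Char) :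
    PySem.Chars.replace.go old new 0 l acc = acc.reverse ++ l := rfl

theorem replaceGo_succ_nil (old new : List Char) (fuel : Nat) (acc : List Char) :
    PySem.Chars.replace.go old new (fuel + 1) [] acc = acc.reverse := rfl

theorem replaceGo_succ_cons (old new : List Char) (fuel : Nat) (c : Char) (t acc : List Char) :
    PySem.Chars.replace.go old new (fuel + 1) (c :: t) acc =
      if old.isPrefixOf (c :: t) then
        PySem.Chars.replace.go old new fuel (List.drop old.length (c :: t)) (new.reverse ++ acc)
      else
        PySem.Chars.replace.go old new fuel t (c :: acc) := rfl

theorem replaceGo_len_le (fuel : Nat) :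
    ∀ (l acc : List Char),
      (PySem.Chars.replace.go ppapConst ['P'] fuel l acc).length ≤ acc.length + l.length := by
  induction fuel with
  | zero => intro l acc; rw [replaceGo_zero]; simp
  | succ fuel ih =>
    intro l acc
    cases l with
    | nil => rw [replaceGo_succ_nil]; simp
    | cons c t =>
      rw [replaceGo_succ_cons]
      split
      · rename_i hpre
        have hle : ppapConst.length ≤ (c :: t).length :=
          (List.isPrefixOf_iff_prefix.mp hpre).length_le
        have hb := ih (List.drop ppapConst.length (c :: t)) (['P'].reverse ++ acc)
        refine le_trans hb ?_
        have h4 : ppapConst.length = 4 := rfl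
        simp only [h4, List.length_append, List.length_reverse, List.length_drop,
          List.length_cons, List.length_nil] at hle ⊢
        omega
      · have hb := ih t (c :: acc)
        simp only [List.length_cons] at hb ⊢
        omega

theorem replaceGo_len_lt (fuel : Nat) :
    ∀ (l acc : List Char), l.length ≤ fuel → ppapConst <:+: l →
      (PySem.Chars.replace.go ppapConst ['P'] fuel l acc).length < acc.length + l.length := by
  induction fuel with
  | zero =>
    intro l acc hf hinf
    have hl : l = [] := List.length_eq_zero_iff.mp (Nat.le_zero.mp hf)
    subst hl
    have := hinf.length_le
    simp [ppapConst] at this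
  | succ fuel ih =>
    intro l acc hf hinf
    cases l with
    | nil =>
      have := hinf.length_le
      simp [ppapConst] at this
    | cons c t =>
      rw [replaceGo_succ_cons]
      split
      · rename_i hpre
        have hle : ppapConst.length ≤ (c :: t).length :=
          (List.isPrefixOf_iff_prefix.mp hpre).length_le
        have hb := replaceGo_len_le fuel (List.drop ppapConst.length (c :: t)) (['P'].reverse ++ acc)
        refine lt_of_le_of_lt hb ?_
        have h4 : ppapConst.length = 4 := rfl
        simp only [h4, List.length_append, List.length_reverse, List.length_drop,
          List.length_cons, List.length_nil] at hle ⊢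
        omega
      · rename_i hpre
        have hinf' : ppapConst <:+: t := by
          rcases List.infix_cons_iff.mp hinf with h | h
          · exact absurd (List.isPrefixOf_iff_prefix.mpr h) (by simpa using hpre)
          · exact h
        have hb := ih t (c :: acc) (by simpa using Nat.lt_succ_iff.mp (by simpa using hf)) hinf'
        simp only [List.length_cons] at hb ⊢
        omega

theorem replace_len_lt (l : List Char) (h : PySem.Chars.isIn ppapConst l = true) :
    (PySem.Chars.replace l ppapConst ['P']).length < l.length := by
  have hinf : ppapConst <:+: l := (PySem.Chars.isIn_iff_infix ppapConst l).mp h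
  rw [PySem.Chars.replace, if_neg (by simp [ppapConst])]
  simpa using replaceGo_len_lt l.length l [] le_rfl hinf

-- while 'PPAP' in s: s = s.replace('PPAP', 'P')
def altLoop (l : List Char) : List Char :=
  if h : PySem.Chars.isIn ppapConst l = true then
    altLoop (PySem.Chars.replace l ppapConst ['P'])
  else l
termination_by l.length
decreasing_by exact replace_len_lt l h

-- return 'PPAP' if s == 'P' else 'NP'
def isPPAP_alt (s : String) : String :=
  if altLoop s.toList = ['P'] then "PPAP" else "NP"

-- ===== PRECONDITION & SPEC =====
def Spec_isPPAP (s : String) (out : String) : Prop := out = isPPAP_alt s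
instance (s : String) (out : String) : Decidable (Spec_isPPAP s out) := by unfold Spec_isPPAP; infer_instance

-- ===== CLAIM (what is proved, stated in full; the proofs are below) =====
def Claim_equal_isPPAP : Prop := ∀ (s : String), Dom_isPPAP s → Spec_isPPAP s (isPPAP s)

-- ===== LEMMAS AND PROOFS =====

-- A's reduction guard fires exactly when the stack ends with 'PPAP'
theorem step_cond_iff (l : List Char) :
    (4 ≤ l.length ∧ PySem.List.slice l (some (-4)) none = ppapConst) ↔ ppapConst <:+ l := by
  rw [PySem.List.slice_from_neg_ofNat l 4 (by omega)]
  constructor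
  · rintro ⟨h4, hdrop⟩
    exact ⟨l.take (l.length - 4), by rw [← hdrop]; exact List.take_append_drop _ l⟩
  · rintro ⟨t, rfl⟩
    refine ⟨by simp [ppapConst], ?_⟩
    have : (t ++ ppapConst).length - 4 = t.length := by simp [ppapConst]
    rw [this, List.drop_left]

theorem step_reduce (t : List Char) :
    isPPAPstep (t ++ ['P', 'P', 'A']) 'P' = t ++ ['P'] := by
  unfold isPPAPstep
  rw [if_pos]
  · have hr : PySem.List.pyRange 0 3 1 = [0, 1, 2] := by decide
    rw [hr]
    show ((((t ++ ['P','P','A']) ++ ['P']).dropLast).dropLast).dropLast = t ++ ['P']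
    simp
  · exact (step_cond_iff _).mpr ⟨t, by simp [ppapConst]⟩

theorem step_noreduce (d : List Char) (c : Char) (h : ¬ ppapConst <:+ d ++ [c]) :
    isPPAPstep d c = d ++ [c] := by
  unfold isPPAPstep
  rw [if_neg]
  intro hc
  exact h ((step_cond_iff _).mp hc)

theorem step_P_concat (d : List Char) : ∃ t, isPPAPstep d 'P' = t ++ ['P'] := by
  by_cases h : ppapConst <:+ d ++ ['P']
  · obtain ⟨u, hu⟩ := h
    have hu' : (u ++ ['P', 'P', 'A']) ++ ['P'] = d ++ ['P'] := by
      simpa [ppapConst] using hu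
    have hd : u ++ ['P', 'P', 'A'] = d := List.append_cancel_right hu'
    exact ⟨u, by rw [← hd, step_reduce]⟩
  · exact ⟨d, step_noreduce d 'P' h⟩

-- the heart of the equivalence: feeding 'PPAP' to A's stack machine = feeding a single 'P'
theorem fold_ppap (d : List Char) :
    List.foldl isPPAPstep d ppapConst = isPPAPstep d 'P' := by
  obtain ⟨t, h1⟩ := step_P_concat d
  simp only [ppapConst, List.foldl_cons, List.foldl_nil]
  rw [h1]
  have h2 : isPPAPstep (t ++ ['P']) 'P' = t ++ ['P', 'P'] := by
    rw [step_noreduce]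
    · simp
    · rintro ⟨u, hu⟩
      have := congrArg (fun x => x.dropLast.getLast?) hu
      simp [ppapConst] at this
  rw [h2]
  have h3 : isPPAPstep (t ++ ['P', 'P']) 'A' = t ++ ['P', 'P', 'A'] := by
    rw [step_noreduce]
    · simp
    · rintro ⟨u, hu⟩
      have := congrArg List.getLast? hu
      simp [ppapConst] at this
  rw [h3, step_reduce]

-- replacing every 'PPAP' with 'P' is invisible to A's stack machine
theorem fold_replaceGo (fuel : Nat) :
    ∀ (l acc d : List Char),
      List.foldl isPPAPstep d (PySem.Chars.replace.go ppapConst ['P'] fuel l acc) =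
      List.foldl isPPAPstep d (acc.reverse ++ l) := by
  induction fuel with
  | zero => intro l acc d; rw [replaceGo_zero]
  | succ fuel ih =>
    intro l acc d
    cases l with
    | nil => rw [replaceGo_succ_nil]; simp
    | cons c t =>
      rw [replaceGo_succ_cons]
      split
      · rename_i hpre
        obtain ⟨u, hu⟩ := List.isPrefixOf_iff_prefix.mp hpre
        rw [ih]
        have hdrop : List.drop ppapConst.length (c :: t) = u := by
          rw [← hu, List.drop_left]
        rw [hdrop, ← hu]
        have hrev : (['P'].reverse ++ acc).reverse = acc.reverse ++ ['P'] := by simp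
        rw [hrev, List.append_assoc, List.foldl_append, List.foldl_append,
          List.foldl_append, List.foldl_append]
        congr 1
        exact (fold_ppap _).symm
      · rw [ih]; simp

theorem fold_replace (l d : List Char) :
    List.foldl isPPAPstep d (PySem.Chars.replace l ppapConst ['P']) =
    List.foldl isPPAPstep d l := by
  rw [PySem.Chars.replace, if_neg (by simp [ppapConst])]
  simpa using fold_replaceGo l.length l [] d

-- a 'PPAP'-free string passes through A's stack machine unchanged
theorem fold_nf (l : List Char) (h : ¬ ppapConst <:+: l) :
    List.foldl isPPAPstep [] l = l := by
  induction l using List.reverseRecOn with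
  | nil => rfl
  | append_singleton u c ih =>
    have hu : ¬ ppapConst <:+: u :=
      fun hi => h (hi.trans (List.prefix_append u [c]).isInfix)
    rw [List.foldl_append, ih hu]
    exact step_noreduce u c (fun hs => h hs.isInfix)

theorem altLoop_nf (l : List Char) : ¬ ppapConst <:+: altLoop l := by
  fun_induction altLoop with
  | case1 l h ih => exact ih
  | case2 l h =>
    intro hinf
    exact h ((PySem.Chars.isIn_iff_infix ppapConst l).mpr hinf)

theorem altLoop_fold (l : List Char) :
    List.foldl isPPAPstep [] (altLoop l) = List.foldl isPPAPstep [] l := by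
  fun_induction altLoop with
  | case1 l h ih => rw [ih, fold_replace]
  | case2 l h => rfl

-- A's stack at the end of the scan IS B's rewrite normal form
theorem stack_eq_altLoop (l : List Char) :
    List.foldl isPPAPstep [] l = altLoop l := by
  rw [← altLoop_fold, fold_nf _ (altLoop_nf l)]

-- ===== VERDICT (by name: the statement is the Claim_ definition above) =====
theorem isPPAP_spec : Claim_equal_isPPAP := by
  intro s _
  unfold Spec_isPPAP isPPAP isPPAP_alt
  rw [stack_eq_altLoop]
  by_cases h1 : altLoop s.toList = ['P']
  · rw [if_pos (Or.inl h1), if_pos h1]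
  · rw [if_neg, if_neg h1]
    rintro (h | h)
    · exact h1 h
    · exact altLoop_nf s.toList (h ▸ List.infix_refl _)
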